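-- pv_equiv track=rewrite | github.com/AndersonHsieh0330/serve_tournament_scripts | main.py | check_duplicated_teams
-- ===== SOURCE A (Python) =====
-- def check_duplicated_teams(cur_schedule, num_of_total_games):
--     games_with_error = [False for i in range(num_of_total_games)]
--
--     for game_index, game in enumerate(cur_schedule):
--         temp = set()
--         for court in game:
--             for side in court:
--                 for team in side:
--                     if team in temp:
--                         games_with_error[game_index] = True
--                         break
--                     else:
--                         # remember that 0s are reserved for empty court on purpose
--                         if team != 0: temp.add(team)
--
--     # the games with 1 at its index contain errors
--     return games_with_error
-- ===== SOURCE B (Python) =====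
-- def check_duplicated_teams(cur_schedule, num_of_total_games):
--     result = [False] * num_of_total_games
--     for i, game in enumerate(cur_schedule):
--         flat = [team for court in game for side in court for team in side if team != 0]
--         if len(flat) != len(set(flat)):
--             result[i] = True
--     return result
-- ===== Notes on version B (the rewrite author's own statement) =====
-- stated objective: simpler
-- what changed: Replaces the incremental membership-test set with inner break by one flatten-and-filter per game followed by a single len(flat) != len(set(flat)) comparison.
import Mathlib
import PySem

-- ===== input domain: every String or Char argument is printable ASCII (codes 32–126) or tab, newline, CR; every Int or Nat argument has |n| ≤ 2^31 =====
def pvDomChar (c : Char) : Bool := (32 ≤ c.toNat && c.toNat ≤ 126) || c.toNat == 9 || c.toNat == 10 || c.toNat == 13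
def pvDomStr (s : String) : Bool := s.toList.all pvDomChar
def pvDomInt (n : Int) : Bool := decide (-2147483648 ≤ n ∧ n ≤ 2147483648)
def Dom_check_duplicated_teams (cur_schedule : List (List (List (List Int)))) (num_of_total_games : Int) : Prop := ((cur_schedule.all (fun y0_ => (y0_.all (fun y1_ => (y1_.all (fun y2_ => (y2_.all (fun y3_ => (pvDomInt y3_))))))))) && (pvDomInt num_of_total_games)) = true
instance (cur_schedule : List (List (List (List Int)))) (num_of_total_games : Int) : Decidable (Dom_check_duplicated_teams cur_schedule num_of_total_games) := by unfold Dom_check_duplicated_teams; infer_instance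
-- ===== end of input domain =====

-- B replaces A's incremental membership-set-with-break scan by a per-game flatten-filter
-- followed by a single length-vs-set-size comparison (objective: simpler).

-- ===== PORT A =====
-- the innermost 'for team in side' loop: a membership hit writes True and breaks
def pvASide (i : Nat) (st : PySem.Set Int × List Bool) (teams : List Int) : PySem.Set Int × List Bool :=
  match teams with
  | [] => st
  | t :: ts =>
    if PySem.Set.contains st.1 t then (st.1, st.2.set i true)
    else pvASide i ((if t ≠ 0 then PySem.Set.add st.1 t else st.1), st.2) ts

def check_duplicated_teams (cur_schedule : List (List (List (List Int)))) (num_of_total_games : Int) : List Bool :=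
  let games_with_error := (PySem.List.pyRange 0 num_of_total_games 1).map (fun _ => false)
  (PySem.List.enumerate cur_schedule).foldl
    (fun gwe p =>
      (p.2.foldl (fun st court => court.foldl (fun st' side => pvASide p.1.toNat st' side) st)
        ((PySem.Set.empty : PySem.Set Int), gwe)).2)
    games_with_error

-- ===== PORT B =====
def check_duplicated_teams_alt (cur_schedule : List (List (List (List Int)))) (num_of_total_games : Int) : List Bool :=
  (PySem.List.enumerate cur_schedule).foldl
    (fun result p =>
      let flat := p.2.flatMap (fun court => court.flatMap (fun side => side.filter (fun team => team ≠ 0)))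
      if flat.length ≠ (PySem.Set.ofList flat).length then result.set p.1.toNat true else result)
    (List.replicate num_of_total_games.toNat false)

-- ===== PRECONDITION & SPEC =====
-- the flattened nonzero team numbers of one game (used only to state Pre_)
def pvFlatTeams (game : List (List (List Int))) : List Int :=
  game.flatMap (fun court => court.flatMap (fun side => side.filter (fun team => team ≠ 0)))

-- Pre_ excludes exactly the inputs where Python A raises IndexError: a game whose team
-- numbers contain a duplicate while its index is out of range of the result list.
def Pre_check_duplicated_teams (cur_schedule : List (List (List (List Int)))) (num_of_total_games : Int) : Prop :=
  ∀ p ∈ PySem.List.enumerate cur_schedule, ¬ (pvFlatTeams p.2).Nodup → p.1 < num_of_total_games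

instance (cur_schedule : List (List (List (List Int)))) (num_of_total_games : Int) : Decidable (Pre_check_duplicated_teams cur_schedule num_of_total_games) := by unfold Pre_check_duplicated_teams; infer_instance

def pvWitness_check_duplicated_teams : List (List (List (List Int))) × Int := ([[[[1, 2], [1, 3]]]], 2)

def Spec_check_duplicated_teams (cur_schedule : List (List (List (List Int)))) (num_of_total_games : Int) (out : List Bool) : Prop := out = check_duplicated_teams_alt cur_schedule num_of_total_games
instance (cur_schedule : List (List (List (List Int)))) (num_of_total_games : Int) (out : List Bool) : Decidable (Spec_check_duplicated_teams cur_schedule num_of_total_games out) := by unfold Spec_check_duplicated_teams; infer_instance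

-- ===== CLAIM (what is proved, stated in full; the proofs are below) =====
def Claim_equal_check_duplicated_teams : Prop := ∀ (cur_schedule : List (List (List (List Int)))) (num_of_total_games : Int), Dom_check_duplicated_teams cur_schedule num_of_total_games → Pre_check_duplicated_teams cur_schedule num_of_total_games → Spec_check_duplicated_teams cur_schedule num_of_total_games (check_duplicated_teams cur_schedule num_of_total_games)

-- ===== LEMMAS AND PROOFS =====

-- pure re-statement of A's scan outcome: does the incremental scan hit a member?
def pvBad (temp : PySem.Set Int) : List Int → Bool
  | [] => false
  | t :: ts => PySem.Set.contains temp t || pvBad (if t ≠ 0 then PySem.Set.add temp t else temp) ts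

def pvAdds (temp : PySem.Set Int) (l : List Int) : PySem.Set Int :=
  l.foldl (fun s t => if t ≠ 0 then PySem.Set.add s t else s) temp

theorem pvASide_absorb (i : Nat) (teams : List Int) : ∀ (temp : PySem.Set Int) (g : List Bool),
    (pvASide i (temp, g.set i true) teams).2 = g.set i true := by
  induction teams with
  | nil => intro temp g; rfl
  | cons t ts ih =>
    intro temp g
    by_cases h : t ∈ temp
    · simp [pvASide, h, List.set_set]
    · simp only [pvASide]
      rw [if_neg (by simpa using h)]
      exact ih _ g

theorem pvASide_bad_false (i : Nat) (teams : List Int) : ∀ (temp : PySem.Set Int) (g : List Bool),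
    pvBad temp teams = false → pvASide i (temp, g) teams = (pvAdds temp teams, g) := by
  induction teams with
  | nil => intro temp g _; rfl
  | cons t ts ih =>
    intro temp g h
    simp only [pvBad, Bool.or_eq_false_iff] at h
    simp only [pvASide, pvAdds, List.foldl_cons]
    rw [if_neg (by simpa using h.1)]
    exact ih _ g h.2

theorem pvASide_bad_true (i : Nat) (teams : List Int) : ∀ (temp : PySem.Set Int) (g : List Bool),
    pvBad temp teams = true → (pvASide i (temp, g) teams).2 = g.set i true := by
  induction teams with
  | nil => intro temp g h; simp [pvBad] at h
  | cons t ts ih =>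
    intro temp g h
    by_cases hc : t ∈ temp
    · simp [pvASide, hc]
    · have hc' : PySem.Set.contains temp t = false := by simpa using hc
      simp only [pvBad, hc', Bool.false_or] at h
      simp only [pvASide]
      rw [if_neg (by simpa using hc)]
      exact ih _ g h

theorem pvBad_append (l1 l2 : List Int) : ∀ temp : PySem.Set Int,
    pvBad temp (l1 ++ l2) = (pvBad temp l1 || pvBad (pvAdds temp l1) l2) := by
  induction l1 with
  | nil => intro temp; simp [pvBad, pvAdds]
  | cons t ts ih =>
    intro temp
    simp only [List.cons_append, pvBad, ih, pvAdds, List.foldl_cons, Bool.or_assoc]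

theorem pvFoldSides_absorb (i : Nat) (sides : List (List Int)) :
    ∀ (temp : PySem.Set Int) (g : List Bool),
    (sides.foldl (fun st side => pvASide i st side) (temp, g.set i true)).2 = g.set i true := by
  induction sides with
  | nil => intro temp g; rfl
  | cons s ss ih =>
    intro temp g
    have h := pvASide_absorb i s temp g
    have hst : pvASide i (temp, g.set i true) s
        = ((pvASide i (temp, g.set i true) s).1, g.set i true) := Prod.ext rfl h
    simp only [List.foldl_cons]
    rw [hst]
    exact ih _ g

theorem pvFoldSides (i : Nat) (sides : List (List Int)) :
    ∀ (temp : PySem.Set Int) (g : List Bool),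
    (sides.foldl (fun st side => pvASide i st side) (temp, g)).2
      = if pvBad temp (sides.flatMap id) then g.set i true else g := by
  induction sides with
  | nil => intro temp g; simp [pvBad]
  | cons s ss ih =>
    intro temp g
    simp only [List.flatMap_cons, id, pvBad_append, List.foldl_cons]
    by_cases hb : pvBad temp s = true
    · have h2 := pvASide_bad_true i s temp g hb
      have hst : pvASide i (temp, g) s = ((pvASide i (temp, g) s).1, g.set i true) :=
        Prod.ext rfl h2
      rw [hst, pvFoldSides_absorb, hb]
      simp
    · have hb' : pvBad temp s = false := by simpa using hb
      rw [pvASide_bad_false i s temp g hb', ih, hb']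
      simp

theorem pvFoldNested (i : Nat) (game : List (List (List Int))) :
    ∀ st : PySem.Set Int × List Bool,
    game.foldl (fun st court => court.foldl (fun st' side => pvASide i st' side) st) st
      = (game.flatMap id).foldl (fun st' side => pvASide i st' side) st := by
  induction game with
  | nil => intro st; rfl
  | cons c g ih =>
    intro st
    simp only [List.foldl_cons, List.flatMap_cons, id, List.foldl_append, ih]

theorem pvBad_filter (l : List Int) : ∀ temp : PySem.Set Int, (0 : Int) ∉ temp →
    pvBad temp l = pvBad temp (l.filter (fun t => t ≠ 0)) := by
  induction l with
  | nil => intro temp _; rfl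
  | cons t ts ih =>
    intro temp h0
    by_cases ht : t = 0
    · subst ht
      have hc : PySem.Set.contains temp (0 : Int) = false := by simpa using h0
      simp only [pvBad, hc, Bool.false_or, List.filter_cons]
      rw [if_neg (by simp), if_neg (by simp)]
      exact ih temp h0
    · have h0' : (0 : Int) ∉ PySem.Set.add temp t := by
        simp [PySem.Set.mem_add, h0]; omega
      simp only [List.filter_cons]
      rw [if_pos (by simpa using ht)]
      simp only [pvBad]
      rw [if_pos ht]
      rw [ih _ h0']

theorem pvBad_eq_false_iff (l : List Int) : ∀ temp : PySem.Set Int, (∀ t ∈ l, t ≠ 0) →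
    (pvBad temp l = false ↔ (l.Nodup ∧ ∀ t ∈ l, t ∉ temp)) := by
  induction l with
  | nil => intro temp _; simp [pvBad]
  | cons t ts ih =>
    intro temp hnz
    have ht : t ≠ 0 := hnz t (by simp)
    have hts : ∀ x ∈ ts, x ≠ 0 := fun x hx => hnz x (by simp [hx])
    have hstep : pvBad temp (t :: ts)
        = (PySem.Set.contains temp t || pvBad (PySem.Set.add temp t) ts) := by
      simp only [pvBad]
      rw [if_pos ht]
    rw [hstep, Bool.or_eq_false_iff, ih (PySem.Set.add temp t) hts]
    have hcm : (PySem.Set.contains temp t = false) ↔ t ∉ temp := by simp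
    rw [hcm, List.nodup_cons]
    constructor
    · rintro ⟨hct, hnd, hmem⟩
      refine ⟨⟨fun hm => (hmem t hm) (by simp [PySem.Set.mem_add]), hnd⟩, ?_⟩
      rintro x hx
      rcases List.mem_cons.mp hx with rfl | hx'
      · exact hct
      · intro hm
        exact hmem x hx' (by simp [PySem.Set.mem_add, hm])
    · rintro ⟨⟨htts, hnd⟩, hmem⟩
      refine ⟨hmem t (by simp), hnd, ?_⟩
      intro x hx hm
      rcases (by simpa [PySem.Set.mem_add] using hm : x ∈ temp ∨ x = t) with hm' | rfl
      · exact hmem x (by simp [hx]) hm'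
      · exact htts hx

theorem pv_nodup_iff_len (l : List Int) : l.Nodup ↔ l.length = (PySem.Set.ofList l).length := by
  induction l using List.reverseRecOn with
  | nil => simp [PySem.Set.ofList]
  | append_singleton xs x ih =>
    rw [PySem.Set.ofList_append_singleton, PySem.Set.add_eq_ite]
    have hle := PySem.Set.length_ofList_le (xs := xs)
    have hnd : (xs ++ [x]).Nodup ↔ xs.Nodup ∧ x ∉ xs := by
      simp only [List.nodup_append, List.nodup_singleton, true_and]
      constructor
      · rintro ⟨h1, h2⟩
        exact ⟨h1, fun hx => h2 x hx x (by simp) rfl⟩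
      · rintro ⟨h1, h2⟩
        refine ⟨h1, fun a ha b hb => ?_⟩
        have hbx : b = x := by simpa using hb
        subst hbx
        exact fun he => h2 (he ▸ ha)
    by_cases hx : x ∈ xs
    · rw [if_pos ((PySem.Set.mem_ofList xs x).mpr hx)]
      rw [hnd]
      simp only [List.length_append, List.length_singleton]
      constructor
      · intro h; exact absurd hx h.2
      · intro h; omega
    · rw [if_neg (fun hm => hx ((PySem.Set.mem_ofList xs x).mp hm))]
      rw [hnd]
      simp only [List.length_append, List.length_singleton]
      constructor
      · intro h; rw [ih.mp h.1]
      · intro h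
        have : xs.length = (PySem.Set.ofList xs).length := by omega
        exact ⟨ih.mpr this, hx⟩

theorem pv_filter_flatMap {α : Type} (l : List (List α)) (p : α → Bool) :
    (l.flatMap id).filter p = l.flatMap (fun x => x.filter p) := by
  induction l with
  | nil => rfl
  | cons c cs ih => simp only [List.flatMap_cons, id, List.filter_append, ih]

-- the two per-game conditions coincide
theorem pvCond_eq (game : List (List (List Int))) :
    pvBad (PySem.Set.empty : PySem.Set Int) ((game.flatMap id).flatMap id)
      = !decide ((game.flatMap (fun court => court.flatMap (fun side => side.filter (fun team => team ≠ 0)))).Nodup) := by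
  have hfil : ((game.flatMap id).flatMap id).filter (fun t => t ≠ 0)
      = game.flatMap (fun court => court.flatMap (fun side => side.filter (fun team => team ≠ 0))) := by
    rw [pv_filter_flatMap, List.flatMap_assoc]
    simp only [id]
  have h0 : (0 : Int) ∉ (PySem.Set.empty : PySem.Set Int) := by simp [PySem.Set.empty]
  rw [pvBad_filter _ _ h0, hfil]
  set fl := game.flatMap (fun court => court.flatMap (fun side => side.filter (fun team => team ≠ 0))) with hfl
  have hnz : ∀ t ∈ fl, t ≠ 0 := by
    intro t htm
    rw [hfl] at htm
    simp only [List.mem_flatMap, List.mem_filter] at htm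
    obtain ⟨c, _, s, _, _, hne⟩ := htm
    simpa using hne
  have hiff := pvBad_eq_false_iff fl (PySem.Set.empty : PySem.Set Int) hnz
  cases hpv : pvBad (PySem.Set.empty : PySem.Set Int) fl with
  | false =>
    have hnd := (hiff.mp hpv).1
    simp [hnd]
  | true =>
    have hnd : ¬ fl.Nodup := by
      intro hnd
      have : pvBad (PySem.Set.empty : PySem.Set Int) fl = false :=
        hiff.mpr ⟨hnd, fun t _ h => by simp [PySem.Set.empty] at h⟩
      rw [this] at hpv; exact absurd hpv (by simp)
    simp [hnd]

theorem pvStep_eq (p : Int × List (List (List Int))) (gwe : List Bool) :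
    (p.2.foldl (fun st court => court.foldl (fun st' side => pvASide p.1.toNat st' side) st)
        ((PySem.Set.empty : PySem.Set Int), gwe)).2
      = (let flat := p.2.flatMap (fun court => court.flatMap (fun side => side.filter (fun team => team ≠ 0)))
         if flat.length ≠ (PySem.Set.ofList flat).length then gwe.set p.1.toNat true else gwe) := by
  show _ = (if (p.2.flatMap (fun court => court.flatMap (fun side => side.filter (fun team => team ≠ 0)))).length
        ≠ (PySem.Set.ofList (p.2.flatMap (fun court => court.flatMap (fun side => side.filter (fun team => team ≠ 0))))).length
      then gwe.set p.1.toNat true else gwe)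
  rw [pvFoldNested, pvFoldSides, pvCond_eq]
  set fl := p.2.flatMap (fun court => court.flatMap (fun side => side.filter (fun team => team ≠ 0)))
  by_cases h : fl.Nodup
  · rw [if_neg (by simp [h]), if_neg (by simpa using (pv_nodup_iff_len fl).mp h)]
  · rw [if_pos (by simp [h]), if_pos (by simpa using fun he => h ((pv_nodup_iff_len fl).mpr he))]

-- ===== VERDICT (by name: the statement is the Claim_ definition above) =====
theorem check_duplicated_teams_spec : Claim_equal_check_duplicated_teams := by
  intro cur_schedule num_of_total_games _ _
  unfold Spec_check_duplicated_teams check_duplicated_teams check_duplicated_teams_alt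
  have hinit : ((PySem.List.pyRange 0 num_of_total_games 1).map (fun _ => false))
      = List.replicate num_of_total_games.toNat false := by
    rw [List.map_const']
    congr 1
    simp [PySem.List.length_pyRange_one]
  simp only [hinit]
  congr 1
  funext gwe p
  exact pvStep_eq p gwe
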